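-- pv_equiv track=rewrite | github.com/SlightlyOffset/AI-companion | engines/formatting.py | get_tts_split_points
-- ===== SOURCE A (Python) =====
-- def get_tts_split_points(text: str) -> list[int]:
--     """
--     Find safe split points for TTS chunking.
--     Splits on asterisk boundaries and sentence punctuation outside narration markers.
--     """
--     points: list[int] = []
--     in_asterisks = False
--     for index, char in enumerate(text):
--         if char == "*":
--             in_asterisks = not in_asterisks
--             points.append(index + 1)
--             continue
--
--         if in_asterisks:
--             continue
--
--         if char in ".!?\n":
--             if char == "." and index + 1 < len(text) and text[index + 1] == ".":
--                 continue
--             if char == "." and index > 0 and text[index - 1] == ".":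
--                 continue
--             points.append(index + 1)
--     return points
-- ===== SOURCE B (Python) =====
-- def get_tts_split_points(text: str) -> list[int]:
--     n = len(text)
--     # prefix[i] = number of '*' among text[:i]; parity tells inside/outside narration
--     prefix = [0] * (n + 1)
--     for i, c in enumerate(text):
--         prefix[i + 1] = prefix[i] + (c == "*")
--
--     def keep(i: int) -> bool:
--         c = text[i]
--         if c == "*":
--             return True
--         if prefix[i] % 2 == 1:
--             return False
--         if c not in ".!?\n":
--             return False
--         if c == ".":
--             if i + 1 < n and text[i + 1] == ".":
--                 return False
--             if i > 0 and text[i - 1] == ".":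
--                 return False
--         return True
--
--     return [i + 1 for i in range(n) if keep(i)]
-- ===== Notes on version B (the rewrite author's own statement) =====
-- stated objective: alternative
-- what changed: Replaces A's single-pass streaming state machine with an in_asterisks toggle by a precomputed prefix star-count table plus a stateless per-index filter that decides inside/outside narration by parity of the prefix count, applying the same dot-adjacency guards.
import Mathlib
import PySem

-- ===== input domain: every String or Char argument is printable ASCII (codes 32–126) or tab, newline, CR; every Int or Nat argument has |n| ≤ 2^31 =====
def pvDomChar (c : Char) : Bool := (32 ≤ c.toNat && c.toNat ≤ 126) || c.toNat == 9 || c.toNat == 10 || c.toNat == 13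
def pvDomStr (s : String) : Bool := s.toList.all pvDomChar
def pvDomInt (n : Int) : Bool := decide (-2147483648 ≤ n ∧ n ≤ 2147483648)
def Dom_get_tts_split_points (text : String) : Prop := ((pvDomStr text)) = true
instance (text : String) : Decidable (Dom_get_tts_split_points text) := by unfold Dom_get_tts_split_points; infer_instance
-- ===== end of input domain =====

-- B replaces A's streaming in_asterisks state machine by a precomputed prefix star-count
-- table plus a parity-based filter over indices (objective: alternative decomposition).

-- ===== PORT A =====
-- one loop-body step of A: state = (points so far, in_asterisks flag), input = (index, char)
def pvStepA (cs : List Char) (st : List Int × Bool) (p : Int × Char) : List Int × Bool :=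
  let points := st.1
  let inA := st.2
  let i := p.1
  let c := p.2
  if c = '*' then (points ++ [i + 1], !inA)
  else if inA then st
  else if c = '.' ∨ c = '!' ∨ c = '?' ∨ c = '\n' then
    if c = '.' ∧ i + 1 < (cs.length : Int) ∧ PySem.List.pyGet? cs (i + 1) = some '.' then st
    else if c = '.' ∧ 0 < i ∧ PySem.List.pyGet? cs (i - 1) = some '.' then st
    else (points ++ [i + 1], inA)
  else st

def get_tts_split_points (text : String) : List Int :=
  ((PySem.List.enumerate text.toList 0).foldl (pvStepA text.toList) ([], false)).1

-- ===== PORT B =====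
-- the prefix-count accumulator of Source B's first loop
def pvF (a : Nat) (c : Char) : Nat := a + (if c = '*' then 1 else 0)

-- Source B's keep(i) predicate
def pvKeepB (cs : List Char) (pref : List Nat) (n : Nat) (i : Nat) : Bool :=
  match cs[i]? with
  | none => false
  | some c =>
    if c = '*' then true
    else if pref.getD i 0 % 2 = 1 then false
    else if ¬(c = '.' ∨ c = '!' ∨ c = '?' ∨ c = '\n') then false
    else if c = '.' ∧ i + 1 < n ∧ cs[i + 1]? = some '.' then false
    else if c = '.' ∧ 0 < i ∧ cs[i - 1]? = some '.' then false
    else true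

def get_tts_split_points_alt (text : String) : List Int :=
  let cs := text.toList
  let n := cs.length
  let pref := List.scanl pvF 0 cs
  ((List.range n).filter (pvKeepB cs pref n)).map (fun i => (i : Int) + 1)

-- ===== PRECONDITION & SPEC =====
def Spec_get_tts_split_points (text : String) (out : List Int) : Prop := out = get_tts_split_points_alt text
instance (text : String) (out : List Int) : Decidable (Spec_get_tts_split_points text out) := by unfold Spec_get_tts_split_points; infer_instance

-- ===== CLAIM (what is proved, stated in full; the proofs are below) =====
def Claim_equal_get_tts_split_points : Prop := ∀ (text : String), Dom_get_tts_split_points text → Spec_get_tts_split_points text (get_tts_split_points text)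

-- ===== LEMMAS AND PROOFS =====

theorem pv_scanl_getD (cs : List Char) (a : Nat) (i : Nat) (h : i ≤ cs.length) :
    (List.scanl pvF a cs).getD i 0 = a + (cs.take i).count '*' := by
  induction cs generalizing a i with
  | nil =>
    have : i = 0 := by simpa using h
    subst this; simp [List.scanl]
  | cons c t ih =>
    cases i with
    | zero => simp [List.scanl]
    | succ j =>
      rw [List.scanl_cons]
      simp only [List.getD, List.getElem?_cons_succ, List.take_succ_cons, List.count_cons]
      have := ih (pvF a c) j (by simpa using h)
      simp only [List.getD] at this
      rw [this]
      unfold pvF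
      by_cases hc : c = '*' <;> simp [hc, beq_iff_eq] <;> try omega

theorem pv_main (cs : List Char) (suf pre : List Char) (h : cs = pre ++ suf)
    (acc : List Int) (flag : Bool) (hf : flag = (pre.count '*' % 2 == 1)) :
    ((PySem.List.enumerate suf (pre.length : Int)).foldl (pvStepA cs) (acc, flag)).1
      = acc ++ ((List.range' pre.length suf.length).filter
          (pvKeepB cs (List.scanl pvF 0 cs) cs.length)).map (fun i => (i : Int) + 1) := by
  induction suf generalizing pre acc flag with
  | nil => simp [PySem.List.enumerate]
  | cons c t ih =>
    have hlook : cs[pre.length]? = some c := by rw [h]; simp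
    have hpref : (List.scanl pvF 0 cs).getD pre.length 0 = pre.count '*' := by
      rw [pv_scanl_getD cs 0 pre.length (by rw [h]; simp)]
      rw [h, List.take_append_of_le_length (by simp)]
      simp
    have hlen1 : ((pre ++ [c]).length : Int) = (pre.length : Int) + 1 := by simp
    have hcs' : cs = (pre ++ [c]) ++ t := by simpa using h
    rw [PySem.List.enumerate_cons, List.foldl_cons]
    simp only [List.length_cons]
    rw [List.range'_succ, List.filter_cons]
    by_cases hstar : c = '*'
    · -- star: both sides emit pre.length+1; flag toggles
      have hkeep : pvKeepB cs (List.scanl pvF 0 cs) cs.length pre.length = true := by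
        unfold pvKeepB; rw [hlook]; simp [hstar]
      have hstep : pvStepA cs (acc, flag) ((pre.length : Int), c)
          = (acc ++ [(pre.length : Int) + 1], !flag) := by
        unfold pvStepA; dsimp only; rw [if_pos hstar]
      rw [hstep, hkeep]
      have htog : (!flag) = ((pre ++ [c]).count '*' % 2 == 1) := by
        subst hf hstar
        simp only [List.count_append, List.count_singleton, beq_self_eq_true, if_true]
        rcases Nat.mod_two_eq_zero_or_one (pre.count '*') with hm | hm <;>
          simp [hm, Nat.add_mod]
      have hrec := ih (pre ++ [c]) hcs' (acc ++ [(pre.length : Int) + 1]) (!flag) htog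
      rw [hlen1] at hrec
      simp only [List.length_append, List.length_cons, List.length_nil, Nat.zero_add] at hrec
      rw [hrec, if_pos rfl]
      simp [List.append_assoc]
    · -- not a star
      have hcount' : (pre ++ [c]).count '*' = pre.count '*' := by
        simp [List.count_append, hstar]
      cases flag with
      | true =>
        -- inside asterisks: both skip
        have hparity : pre.count '*' % 2 = 1 := by
          have := hf.symm; simpa using this
        have hkeep : pvKeepB cs (List.scanl pvF 0 cs) cs.length pre.length = false := by
          unfold pvKeepB; rw [hlook]; dsimp only
          rw [if_neg hstar, hpref]
          simp [hparity]
        have hstep : pvStepA cs (acc, true) ((pre.length : Int), c) = (acc, true) := by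
          unfold pvStepA; dsimp only; rw [if_neg hstar, if_pos rfl]
        rw [hstep, hkeep, if_neg (by simp)]
        have hrec := ih (pre ++ [c]) hcs' acc true (by rw [hcount']; exact hf)
        rw [hlen1] at hrec
        simp only [List.length_append, List.length_cons, List.length_nil, Nat.zero_add] at hrec
        exact hrec
      | false =>
        -- outside asterisks
        have hparity : pre.count '*' % 2 ≠ 1 := by
          have := hf.symm; simpa using this
        have hrec := fun acc' => ih (pre ++ [c]) hcs' acc' false (by rw [hcount']; exact hf)
        have hreceq : ∀ acc' : List Int,
            ((PySem.List.enumerate t ((pre.length : Int) + 1)).foldl (pvStepA cs) (acc', false)).1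
              = acc' ++ ((List.range' (pre.length + 1) t.length).filter
                  (pvKeepB cs (List.scanl pvF 0 cs) cs.length)).map (fun i => (i : Int) + 1) := by
          intro acc'
          have := hrec acc'
          rw [hlen1] at this
          simp only [List.length_append, List.length_cons, List.length_nil, Nat.zero_add] at this
          exact this
        by_cases hpunct : c = '.' ∨ c = '!' ∨ c = '?' ∨ c = '\n'
        · by_cases hg1 : c = '.' ∧ pre.length + 1 < cs.length ∧ cs[pre.length + 1]? = some '.'
          · -- dot followed by dot: skip
            have hkeep : pvKeepB cs (List.scanl pvF 0 cs) cs.length pre.length = false := by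
              unfold pvKeepB; rw [hlook]; dsimp only
              rw [if_neg hstar, hpref, if_neg hparity, if_neg (not_not_intro hpunct), if_pos hg1]
            have hg1' : c = '.' ∧ (pre.length : Int) + 1 < (cs.length : Int) ∧
                PySem.List.pyGet? cs ((pre.length : Int) + 1) = some '.' := by
              refine ⟨hg1.1, by exact_mod_cast hg1.2.1, ?_⟩
              have heq : ((pre.length : Int) + 1) = ((pre.length + 1 : Nat) : Int) := by
                push_cast; ring
              rw [heq, PySem.List.pyGet?_natCast]; exact hg1.2.2
            have hstep : pvStepA cs (acc, false) ((pre.length : Int), c) = (acc, false) := by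
              unfold pvStepA; dsimp only
              rw [if_neg hstar, if_neg (by simp), if_pos hpunct, if_pos hg1']
            rw [hstep, hkeep, if_neg (by simp)]
            exact hreceq acc
          · have hg1'' : ¬(c = '.' ∧ (pre.length : Int) + 1 < (cs.length : Int) ∧
                PySem.List.pyGet? cs ((pre.length : Int) + 1) = some '.') := by
              intro ⟨h1, h2, h3⟩
              apply hg1
              refine ⟨h1, by exact_mod_cast h2, ?_⟩
              have heq : ((pre.length : Int) + 1) = ((pre.length + 1 : Nat) : Int) := by
                push_cast; ring
              rw [heq, PySem.List.pyGet?_natCast] at h3; exact h3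
            by_cases hg2 : c = '.' ∧ 0 < pre.length ∧ cs[pre.length - 1]? = some '.'
            · -- dot preceded by dot: skip
              have hkeep : pvKeepB cs (List.scanl pvF 0 cs) cs.length pre.length = false := by
                unfold pvKeepB; rw [hlook]; dsimp only
                rw [if_neg hstar, hpref, if_neg hparity, if_neg (not_not_intro hpunct),
                  if_neg hg1, if_pos hg2]
              have hg2' : c = '.' ∧ (0 : Int) < (pre.length : Int) ∧
                  PySem.List.pyGet? cs ((pre.length : Int) - 1) = some '.' := by
                refine ⟨hg2.1, by exact_mod_cast hg2.2.1, ?_⟩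
                have heq : ((pre.length : Int) - 1) = ((pre.length - 1 : Nat) : Int) := by
                  have := hg2.2.1; omega
                rw [heq, PySem.List.pyGet?_natCast]; exact hg2.2.2
              have hstep : pvStepA cs (acc, false) ((pre.length : Int), c) = (acc, false) := by
                unfold pvStepA; dsimp only
                rw [if_neg hstar, if_neg (by simp), if_pos hpunct, if_neg hg1'', if_pos hg2']
              rw [hstep, hkeep, if_neg (by simp)]
              exact hreceq acc
            · -- a real split point
              have hkeep : pvKeepB cs (List.scanl pvF 0 cs) cs.length pre.length = true := by
                unfold pvKeepB; rw [hlook]; dsimp only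
                rw [if_neg hstar, hpref, if_neg hparity, if_neg (not_not_intro hpunct),
                  if_neg hg1, if_neg hg2]
              have hg2'' : ¬(c = '.' ∧ (0 : Int) < (pre.length : Int) ∧
                  PySem.List.pyGet? cs ((pre.length : Int) - 1) = some '.') := by
                intro ⟨h1, h2, h3⟩
                apply hg2
                have hp : 0 < pre.length := by exact_mod_cast h2
                refine ⟨h1, hp, ?_⟩
                have heq : ((pre.length : Int) - 1) = ((pre.length - 1 : Nat) : Int) := by omega
                rw [heq, PySem.List.pyGet?_natCast] at h3; exact h3
              have hstep : pvStepA cs (acc, false) ((pre.length : Int), c)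
                  = (acc ++ [(pre.length : Int) + 1], false) := by
                unfold pvStepA; dsimp only
                rw [if_neg hstar, if_neg (by simp), if_pos hpunct, if_neg hg1'', if_neg hg2'']
              rw [hstep, hkeep, if_pos rfl]
              rw [hreceq (acc ++ [(pre.length : Int) + 1])]
              simp [List.append_assoc]
        · -- not punctuation: both skip
          have hkeep : pvKeepB cs (List.scanl pvF 0 cs) cs.length pre.length = false := by
            unfold pvKeepB; rw [hlook]; dsimp only
            rw [if_neg hstar, hpref, if_neg hparity]
            simp [hpunct]
          have hstep : pvStepA cs (acc, false) ((pre.length : Int), c) = (acc, false) := by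
            unfold pvStepA; dsimp only
            rw [if_neg hstar, if_neg (by simp), if_neg hpunct]
          rw [hstep, hkeep, if_neg (by simp)]
          exact hreceq acc

-- ===== VERDICT (by name: the statement is the Claim_ definition above) =====
theorem get_tts_split_points_spec : Claim_equal_get_tts_split_points := by
  intro text _
  unfold Spec_get_tts_split_points get_tts_split_points get_tts_split_points_alt
  have := pv_main text.toList text.toList [] rfl [] false rfl
  simp only [List.length_nil, Nat.cast_zero] at this
  rw [this]
  simp [List.range_eq_range']
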